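-- pv_equiv track=rewrite | github.com/iagocanalejas/regatas | service/utils/synonyms.py | expand_lemmas
-- ===== SOURCE A (Python) =====
-- from typing import List, Set, Iterable
--
-- __expansions = [
--     ['trofeo', 'bandera'],
--     ['trainera', None],
-- ]
--
-- def expand_lemmas(lemmas: Iterable[str]) -> List[List[str]]:
--     """
--     Expand the lemmas to use in search queries
--     Ex:
--         [trofeo] -> [[trofeo], [bandera]]
--     """
--     expanded = [lemmas]
--     for group in __expansions:
--         if not any(w in lemmas for w in group):
--             continue
--
--         # remove the words for all the expanded
--         expanded = [[w for w in le if w not in group] for le in expanded]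
--
--         # add new expansions
--         new_expanded = []
--         for le in expanded:
--             for w in group:
--                 nle = le.copy()
--                 if w:  # this allows to remove a lemma in a new set
--                     nle.append(w)
--                 new_expanded.append(nle)
--         expanded = new_expanded
--     return expanded
-- ===== SOURCE B (Python) =====
-- from itertools import product
-- from typing import List, Iterable
--
-- __expansions = [
--     ['trofeo', 'bandera'],
--     ['trainera', None],
-- ]
--
-- def expand_lemmas(lemmas: Iterable[str]) -> List[List[str]]:
--     matched = [g for g in __expansions if any(w in lemmas for w in g)]
--     if not matched:
--         return [lemmas]
--     removed = [w for g in matched for w in g]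
--     base = [w for w in lemmas if w not in removed]
--     return [base + [w for w in choice if w] for choice in product(*matched)]
-- ===== Notes on version B (the rewrite author's own statement) =====
-- stated objective: simpler
-- what changed: Replaces A's incremental per-group rebuild of the whole expanded list (remove-then-append for each group in turn) by computing the matched groups once, one shared base list with all matched words filtered out, and a single Cartesian-product pass appending the truthy choices.
import Mathlib
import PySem

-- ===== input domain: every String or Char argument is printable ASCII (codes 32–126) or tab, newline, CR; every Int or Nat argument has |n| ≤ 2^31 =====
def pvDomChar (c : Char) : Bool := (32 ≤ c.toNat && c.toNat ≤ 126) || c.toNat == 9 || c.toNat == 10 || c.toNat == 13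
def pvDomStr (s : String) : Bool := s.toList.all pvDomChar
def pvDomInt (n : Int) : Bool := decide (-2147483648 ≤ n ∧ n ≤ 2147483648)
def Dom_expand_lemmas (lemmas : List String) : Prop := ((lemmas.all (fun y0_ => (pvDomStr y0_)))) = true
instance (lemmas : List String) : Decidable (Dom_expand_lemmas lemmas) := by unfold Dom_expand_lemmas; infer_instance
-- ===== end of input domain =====

-- B replaces A's per-group incremental rebuild of `expanded` by one filter of the
-- matched groups, one base list, and a single Cartesian product pass (objective: simpler).

-- The module constant __expansions; a group element is `Option String` (None → none).
def pvExpansions : List (List (Option String)) :=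
  [[some "trofeo", some "bandera"], [some "trainera", none]]

-- Python truthiness of a group element: None and "" are falsy.
def pvTruthy : Option String → Bool
  | none => false
  | some s => s.length ≠ 0

-- `w in lemmas` for a group element w (None is never in a list of strings).
def pvMem (lemmas : List String) : Option String → Bool
  | none => false
  | some s => lemmas.contains s

-- ===== PORT A =====
def expand_lemmas (lemmas : List String) : List (List String) :=
  pvExpansions.foldl (fun expanded group =>
    if ¬ (group.any (pvMem lemmas)) then expanded
    else
      -- remove the words for all the expanded
      let expanded := expanded.map (fun le => le.filter (fun w => ¬ group.contains (some w)))
      -- add new expansions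
      expanded.foldl (fun newExpanded le =>
        group.foldl (fun acc w =>
          acc ++ [if pvTruthy w then le ++ [w.getD ""] else le]) newExpanded) []
    ) [lemmas]

-- ===== PORT B =====
-- itertools.product over lists (rightmost factor varies fastest)
def pvProduct : List (List (Option String)) → List (List (Option String))
  | [] => [[]]
  | g :: rest => g.flatMap (fun x => (pvProduct rest).map (fun t => x :: t))

def expand_lemmas_alt (lemmas : List String) : List (List String) :=
  let matched := pvExpansions.filter (fun g => g.any (pvMem lemmas))
  if matched.isEmpty then [lemmas]
  else
    let removed := matched.flatten
    let base := lemmas.filter (fun w => ¬ removed.contains (some w))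
    (pvProduct matched).map (fun choice =>
      base ++ choice.filterMap (fun w => if pvTruthy w then some (w.getD "") else none))

-- ===== PRECONDITION & SPEC =====
def Spec_expand_lemmas (lemmas : List String) (out : List (List String)) : Prop := out = expand_lemmas_alt lemmas
instance (lemmas : List String) (out : List (List String)) : Decidable (Spec_expand_lemmas lemmas out) := by unfold Spec_expand_lemmas; infer_instance

-- ===== CLAIM (what is proved, stated in full; the proofs are below) =====
def Claim_equal_expand_lemmas : Prop := ∀ (lemmas : List String), Dom_expand_lemmas lemmas → Spec_expand_lemmas lemmas (expand_lemmas lemmas)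

-- ===== LEMMAS AND PROOFS =====

-- ===== VERDICT (by name: the statement is the Claim_ definition above) =====
theorem expand_lemmas_spec : Claim_equal_expand_lemmas := by
  intro lemmas _
  show expand_lemmas lemmas = expand_lemmas_alt lemmas
  by_cases h1 : "trofeo" ∈ lemmas <;>
  by_cases h2 : "bandera" ∈ lemmas <;>
  by_cases h3 : "trainera" ∈ lemmas <;>
  simp [expand_lemmas, expand_lemmas_alt, pvExpansions, pvProduct, pvMem, pvTruthy,
    h1, h2, h3, List.filter_append, List.filter_filter] <;>
  (first
    | rfl
    | (apply List.filter_congr; intro w _;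
       by_cases hw1 : w = "trofeo" <;> by_cases hw2 : w = "bandera" <;>
       by_cases hw3 : w = "trainera" <;> simp [hw1, hw2, hw3]))
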